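-- pv_equiv track=rewrite | github.com/joshButWhy/advent-of-code-2024 | dayTwo/main.py | isLevelSafe
-- ===== SOURCE A (Python) =====
-- def isLevelSafe(level):
--     curLineSorted = sorted(level)
--     curLineReversed = sorted(level[:])[::-1]
--     if (level != curLineSorted):
--         if (level != curLineReversed):
--             return False
--
--     for x in range(1, len(level)):
--         if abs(level[x] - level[x - 1]) < 1 or abs(level[x] - level[x - 1]) > 3:
--             return False
--     return True
-- ===== SOURCE B (Python) =====
-- def isLevelSafe(level):
--     diffs = [b - a for a, b in zip(level, level[1:])]
--     return all(1 <= d <= 3 for d in diffs) or all(-3 <= d <= -1 for d in diffs)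
-- ===== Notes on version B (the rewrite author's own statement) =====
-- stated objective: alternative
-- what changed: B drops A's two sorts and comparisons against sorted copies: one linear pass over adjacent differences, accepted iff they are all small positive steps or all small negative steps.
import Mathlib
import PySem

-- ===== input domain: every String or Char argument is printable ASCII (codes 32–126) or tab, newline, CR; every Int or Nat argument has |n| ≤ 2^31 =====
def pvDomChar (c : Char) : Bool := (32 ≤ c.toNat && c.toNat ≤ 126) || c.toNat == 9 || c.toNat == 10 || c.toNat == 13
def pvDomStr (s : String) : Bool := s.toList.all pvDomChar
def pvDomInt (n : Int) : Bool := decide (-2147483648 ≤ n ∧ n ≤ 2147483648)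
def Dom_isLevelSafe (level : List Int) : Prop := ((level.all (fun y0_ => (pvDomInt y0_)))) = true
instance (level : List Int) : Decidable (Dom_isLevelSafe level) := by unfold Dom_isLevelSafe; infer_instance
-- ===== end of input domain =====

-- B replaces A's two sorts and sorted-copy comparisons with a single linear pass over adjacent differences.

-- ===== PORT A =====
-- the for-loop 'for x in range(1, len(level)): if … return False' as structural recursion on the index x
def isLevelSafeLoop (level : List Int) (x : Nat) : Bool :=
  if x < level.length then
    -- indices x and x-1 are always in range here, so getD is exact for level[x], level[x-1]
    if |level.getD x 0 - level.getD (x - 1) 0| < 1 ∨ |level.getD x 0 - level.getD (x - 1) 0| > 3 then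
      false
    else
      isLevelSafeLoop level (x + 1)
  else true
  termination_by level.length - x

def isLevelSafe (level : List Int) : Bool :=
  let curLineSorted := PySem.List.sorted level (fun v => v) false
  -- level[:] copies the list; [::-1] reverses it (exact)
  let curLineReversed := (PySem.List.sorted level (fun v => v) false).reverse
  if level ≠ curLineSorted ∧ level ≠ curLineReversed then false
  else isLevelSafeLoop level 1

-- ===== PORT B =====
def isLevelSafe_alt (level : List Int) : Bool :=
  let diffs := (level.zip level.tail).map (fun p => p.2 - p.1)
  diffs.all (fun d => decide (1 ≤ d) && decide (d ≤ 3)) ||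
    diffs.all (fun d => decide (-3 ≤ d) && decide (d ≤ -1))

-- ===== PRECONDITION & SPEC =====
def Spec_isLevelSafe (level : List Int) (out : Bool) : Prop := out = isLevelSafe_alt level
instance (level : List Int) (out : Bool) : Decidable (Spec_isLevelSafe level out) := by unfold Spec_isLevelSafe; infer_instance

-- ===== CLAIM (what is proved, stated in full; the proofs are below) =====
def Claim_equal_isLevelSafe : Prop := ∀ (level : List Int), Dom_isLevelSafe level → Spec_isLevelSafe level (isLevelSafe level)

-- ===== LEMMAS AND PROOFS =====

-- 'all adjacent pairs satisfy p', the common shape of both ports' checks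
def adjAll (p : Int → Int → Bool) (l : List Int) : Bool :=
  (l.zip l.tail).all (fun q => p q.1 q.2)

theorem adjAll_nil (p : Int → Int → Bool) : adjAll p [] = true := rfl
theorem adjAll_single (p : Int → Int → Bool) (a : Int) : adjAll p [a] = true := rfl
theorem adjAll_cons₂ (p : Int → Int → Bool) (a b : Int) (t : List Int) :
    adjAll p (a :: b :: t) = (p a b && adjAll p (b :: t)) := by
  simp [adjAll]

theorem adjAll_iff_chain' (p : Int → Int → Bool) (l : List Int) :
    adjAll p l = true ↔ l.IsChain (fun a b => p a b = true) := by
  induction l with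
  | nil => simp [adjAll_nil]
  | cons a t ih =>
    cases t with
    | nil => simp [adjAll_single, List.IsChain.singleton]
    | cons b t' =>
      rw [adjAll_cons₂]
      simp only [Bool.and_eq_true, List.isChain_cons_cons]
      exact and_congr Iff.rfl ih

theorem adjAll_congr {p q : Int → Int → Bool} {R : Int → Int → Prop} {l : List Int}
    (hc : l.IsChain R) (h : ∀ a b, R a b → p a b = q a b) :
    adjAll p l = adjAll q l := by
  induction l with
  | nil => rfl
  | cons a t ih =>
    cases t with
    | nil => rfl
    | cons b t' =>
      rw [List.isChain_cons_cons] at hc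
      rw [adjAll_cons₂, adjAll_cons₂, h a b hc.1, ih hc.2]

-- A's index loop computes adjAll of |diff| ∈ [1,3] on the dropped suffix
theorem loop_eq_adjAll (l : List Int) :
    ∀ k, isLevelSafeLoop l (k + 1) = adjAll (fun a b => decide (1 ≤ |b - a| ∧ |b - a| ≤ 3)) (l.drop k) := by
  intro k
  induction hn : l.length - (k + 1) generalizing k with
  | zero =>
    have h1 : ¬ (k + 1 < l.length) := by omega
    have hlen : (l.drop k).length ≤ 1 := by rw [List.length_drop]; omega
    have h2 : l.drop k = [] ∨ ∃ a, l.drop k = [a] := by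
      match h : l.drop k with
      | [] => exact Or.inl rfl
      | [a] => exact Or.inr ⟨a, rfl⟩
      | a :: b :: t => rw [h] at hlen; simp at hlen
    rw [isLevelSafeLoop]
    simp only [h1, if_false]
    rcases h2 with h | ⟨a, h⟩ <;> rw [h] <;> rfl
  | succ n ih =>
    have hk1 : k + 1 < l.length := by omega
    have hk : k < l.length := by omega
    have hd : l.drop k = l[k] :: l[k+1] :: l.drop (k + 2) := by
      rw [List.drop_eq_getElem_cons hk, List.drop_eq_getElem_cons hk1]
    have hgk : l.getD (k + 1) 0 = l[k+1] := List.getD_eq_getElem l 0 hk1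
    have hgk' : l.getD (k + 1 - 1) 0 = l[k] := by
      simpa using List.getD_eq_getElem l 0 hk
    rw [isLevelSafeLoop]
    simp only [hk1, if_true, hgk, hgk']
    have hrec : isLevelSafeLoop l (k + 1 + 1) =
        adjAll (fun a b => decide (1 ≤ |b - a| ∧ |b - a| ≤ 3)) (l.drop (k + 1)) := ih (k + 1) (by omega)
    have hd1 : l.drop (k + 1) = l[k+1] :: l.drop (k + 2) := List.drop_eq_getElem_cons hk1
    rw [hd, adjAll_cons₂, ← hd1, ← hrec]
    by_cases hcond : |l[k+1] - l[k]| < 1 ∨ |l[k+1] - l[k]| > 3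
    · simp only [hcond, if_true]
      have : ¬ (1 ≤ |l[k+1] - l[k]| ∧ |l[k+1] - l[k]| ≤ 3) := by omega
      simp [this]
    · simp only [hcond, if_false]
      have : 1 ≤ |l[k+1] - l[k]| ∧ |l[k+1] - l[k]| ≤ 3 := by omega
      simp [this]

-- abbreviations for the three pair predicates
def pInc : Int → Int → Bool := fun a b => decide (1 ≤ b - a) && decide (b - a ≤ 3)
def pDec : Int → Int → Bool := fun a b => decide (-3 ≤ b - a) && decide (b - a ≤ -1)
def pAbs : Int → Int → Bool := fun a b => decide (1 ≤ |b - a|) && decide (|b - a| ≤ 3)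

theorem alt_eq_adjAll (l : List Int) :
    isLevelSafe_alt l = (adjAll pInc l || adjAll pDec l) := by
  simp [isLevelSafe_alt, adjAll, pInc, pDec, List.all_map, Function.comp_def]

theorem a_eq (l : List Int) :
    isLevelSafe l =
      (if l ≠ PySem.List.sorted l (fun v => v) false ∧
          l ≠ (PySem.List.sorted l (fun v => v) false).reverse then false
       else adjAll pAbs l) := by
  simp only [isLevelSafe]
  split
  · rfl
  · simpa [pAbs] using loop_eq_adjAll l 0

theorem chain_le_of_sorted {l : List Int}
    (h : l = PySem.List.sorted l (fun v => v) false) :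
    l.IsChain (fun a b : Int => a ≤ b) := by
  have hp := PySem.List.sorted_pairwise l (fun v : Int => v)
  rw [← h] at hp
  exact List.isChain_iff_pairwise.mpr hp

theorem chain_ge_of_revsorted {l : List Int}
    (h : l = (PySem.List.sorted l (fun v => v) false).reverse) :
    l.IsChain (fun a b : Int => b ≤ a) := by
  have hp := PySem.List.sorted_pairwise l (fun v : Int => v)
  have hpw : l.Pairwise (fun a b : Int => b ≤ a) := by
    rw [h]; exact hp.reverse
  exact List.isChain_iff_pairwise.mpr hpw

theorem sorted_of_inc {l : List Int} (h : adjAll pInc l = true) :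
    l = PySem.List.sorted l (fun v => v) false := by
  have hc := (adjAll_iff_chain' pInc l).mp h
  have hlt : l.IsChain (fun a b : Int => a < b) := by
    refine hc.imp ?_
    intro a b hab
    simp [pInc] at hab
    omega
  have hpw : l.Pairwise (fun a b : Int => a < b) := List.isChain_iff_pairwise.mp hlt
  exact (PySem.List.sorted_eq_self_of_pairwise l (fun v : Int => v) (hpw.imp le_of_lt)).symm

theorem revsorted_of_dec {l : List Int} (h : adjAll pDec l = true) :
    l = (PySem.List.sorted l (fun v => v) false).reverse := by
  have hc := (adjAll_iff_chain' pDec l).mp h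
  have hgt : l.IsChain (fun a b : Int => b < a) := by
    refine hc.imp ?_
    intro a b hab
    simp [pDec] at hab
    omega
  have hpw : l.Pairwise (fun a b : Int => b < a) := List.isChain_iff_pairwise.mp hgt
  have hrev : l.reverse.Pairwise (fun a b : Int => a < b) := hpw.reverse
  have := PySem.List.sorted_eq_of_perm_of_pairwise_lt l l.reverse (fun v : Int => v)
      (List.reverse_perm l) hrev
  rw [this, List.reverse_reverse]

theorem abs_eq_inc {l : List Int} (hc : l.IsChain (fun a b : Int => a ≤ b)) :
    adjAll pAbs l = adjAll pInc l := by
  refine adjAll_congr hc ?_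
  intro a b hab
  simp only [pAbs, pInc, ← Bool.decide_and]
  rw [decide_eq_decide, abs_of_nonneg (by omega : (0:Int) ≤ b - a)]

theorem abs_eq_dec {l : List Int} (hc : l.IsChain (fun a b : Int => b ≤ a)) :
    adjAll pAbs l = adjAll pDec l := by
  refine adjAll_congr hc ?_
  intro a b hab
  simp only [pAbs, pDec, ← Bool.decide_and]
  rw [decide_eq_decide, abs_of_nonpos (by omega : b - a ≤ (0:Int))]
  omega

-- ===== VERDICT (by name: the statement is the Claim_ definition above) =====
theorem isLevelSafe_spec : Claim_equal_isLevelSafe := by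
  intro level _
  unfold Spec_isLevelSafe
  rw [a_eq, alt_eq_adjAll]
  by_cases hinc : adjAll pInc level = true
  · have hs := sorted_of_inc hinc
    have : ¬ (level ≠ PySem.List.sorted level (fun v => v) false ∧
        level ≠ (PySem.List.sorted level (fun v => v) false).reverse) := by
      intro h; exact h.1 hs
    rw [if_neg this, abs_eq_inc (chain_le_of_sorted hs), hinc, Bool.true_or]
  · by_cases hdec : adjAll pDec level = true
    · have hr := revsorted_of_dec hdec
      have : ¬ (level ≠ PySem.List.sorted level (fun v => v) false ∧
          level ≠ (PySem.List.sorted level (fun v => v) false).reverse) := by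
        intro h; exact h.2 hr
      rw [if_neg this, abs_eq_dec (chain_ge_of_revsorted hr), hdec,
        Bool.eq_false_iff.mpr hinc, Bool.false_or]
    · have hbf : (adjAll pInc level || adjAll pDec level) = false := by
        rw [Bool.eq_false_iff.mpr hinc, Bool.eq_false_iff.mpr hdec]; rfl
      rw [hbf]
      by_cases hcond : level ≠ PySem.List.sorted level (fun v => v) false ∧
          level ≠ (PySem.List.sorted level (fun v => v) false).reverse
      · rw [if_pos hcond]
      · rw [if_neg hcond]
        push Not at hcond
        by_cases hs : level = PySem.List.sorted level (fun v => v) false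
        · rw [abs_eq_inc (chain_le_of_sorted hs), Bool.eq_false_iff.mpr hinc]
        · rw [abs_eq_dec (chain_ge_of_revsorted (hcond hs)), Bool.eq_false_iff.mpr hdec]
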